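-- pv_equiv track=rewrite | github.com/Sumeet7774/Information-Security-5th-Sem-Code | Exp10_b.py | gronsfeld_encrypt
-- ===== SOURCE A (Python) =====
-- def gronsfeld_encrypt(plaintext, key):
--     encrypted_text = ""
--     key_length = len(key)
--
--     key_index = 0  # Separate index for the key to skip spaces in the plaintext
--     for char in plaintext:
--         if char == " ":  # Preserve spaces in the output
--             encrypted_text += " "
--             continue
--         shift = int(key[key_index % key_length])  # Determine the shift based on the key
--         new_char = chr(((ord(char.upper()) - 65 + shift) % 26) + 65)
--         encrypted_text += new_char
--         key_index += 1  # Increment key_index only if the character is not a space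
--
--     return encrypted_text
-- ===== SOURCE B (Python) =====
-- def gronsfeld_encrypt(plaintext, key):
--     # Two-pass: encrypt the compact non-space sequence, then reinsert spaces.
--     letters = [c for c in plaintext if c != " "]
--     cipher = [chr(((ord(c.upper()) - 65 + int(key[i % len(key)])) % 26) + 65)
--               for i, c in enumerate(letters)]
--     it = iter(cipher)
--     return "".join(" " if c == " " else next(it) for c in plaintext)
-- ===== Notes on version B (the rewrite author's own statement) =====
-- stated objective: alternative
-- what changed: Replaces A's single interleaved loop with a manual key counter and string += by a two-pass decomposition: filter out spaces, encrypt the compact letter sequence by zipping it with its enumerate index, then reassemble the output by walking the original text and re-inserting spaces while consuming the cipher stream.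
import Mathlib
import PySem

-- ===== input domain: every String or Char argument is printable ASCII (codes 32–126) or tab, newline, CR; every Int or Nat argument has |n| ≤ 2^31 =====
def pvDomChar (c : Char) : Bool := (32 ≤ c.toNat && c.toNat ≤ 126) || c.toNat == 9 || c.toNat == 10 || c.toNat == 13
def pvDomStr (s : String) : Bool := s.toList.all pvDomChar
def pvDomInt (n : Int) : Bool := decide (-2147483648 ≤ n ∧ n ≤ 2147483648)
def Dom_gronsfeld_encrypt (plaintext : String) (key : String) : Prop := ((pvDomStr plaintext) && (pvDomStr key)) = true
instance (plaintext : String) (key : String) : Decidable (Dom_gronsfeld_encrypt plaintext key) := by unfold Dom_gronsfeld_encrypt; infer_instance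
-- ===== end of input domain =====

-- B replaces A's single interleaved loop (manual key counter + string +=) by a two-pass
-- decomposition: encrypt the compact non-space sequence, then reinsert spaces (objective: alternative).

-- ===== PORT A =====
-- literal transliteration of A: one fold over the plaintext carrying (encrypted_text, key_index)
def gronsfeld_encrypt (plaintext : String) (key : String) : String :=
  let keyLength : Int := PySem.Str.len key
  let res := plaintext.toList.foldl (fun (st : List Char × Int) char =>
    if char = ' ' then (st.1 ++ [' '], st.2)
    else
      let shift : Int :=
        (PySem.Int.ofChars? [(PySem.List.pyGet? key.toList (PySem.Int.mod st.2 keyLength)).getD ' ']).getD 0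
      let newChar : Char :=
        Char.ofNat (PySem.Int.mod (((PySem.Chars.upperChar char).toNat : Int) - 65 + shift) 26 + 65).toNat
      (st.1 ++ [newChar], st.2 + 1)) ([], 0)
  String.ofList res.1

-- ===== PORT B =====
-- chr(((ord(c.upper()) - 65 + shift) % 26) + 65)
def pvEncChar (c : Char) (shift : Int) : Char :=
  Char.ofNat (PySem.Int.mod (((PySem.Chars.upperChar c).toNat : Int) - 65 + shift) 26 + 65).toNat

-- int(key[i % len(key)])
def pvKeyShift (key : List Char) (i : Int) : Int :=
  (PySem.Int.ofChars? [(PySem.List.pyGet? key (PySem.Int.mod i (key.length : Int))).getD ' ']).getD 0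

-- the final join: walk the original text, emit ' ' for spaces, else consume the next cipher char
def pvReasm : List Char → List Char → List Char
  | [], _ => []
  | c :: rest, cs =>
    if c = ' ' then ' ' :: pvReasm rest cs
    else
      match cs with
      | d :: ds => d :: pvReasm rest ds
      | [] => pvReasm rest []   -- unreachable when cs has one char per remaining non-space char

def gronsfeld_encrypt_alt (plaintext : String) (key : String) : String :=
  let letters := plaintext.toList.filter (fun c => c ≠ ' ')
  let cipher := (PySem.List.enumerate letters 0).map (fun ic => pvEncChar ic.2 (pvKeyShift key.toList ic.1))
  String.ofList (pvReasm plaintext.toList cipher)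

-- ===== PRECONDITION & SPEC =====
-- Pre_ excludes exactly the inputs on which A raises: a plaintext with a non-space character
-- together with an empty key (ZeroDivisionError) or a non-digit among the key positions actually
-- read, key[0..min(n,len(key))), n the non-space count (ValueError from int()).
def Pre_gronsfeld_encrypt (plaintext : String) (key : String) : Prop :=
  (plaintext.toList.filter (fun c => c ≠ ' ')).length = 0 ∨
  (key.toList ≠ [] ∧
    ((key.toList.take (plaintext.toList.filter (fun c => c ≠ ' ')).length).all
      (fun c => c.isDigit)) = true)
instance (plaintext : String) (key : String) : Decidable (Pre_gronsfeld_encrypt plaintext key) := by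
  unfold Pre_gronsfeld_encrypt; infer_instance

def pvWitness_gronsfeld_encrypt : String × String := ("HELLO WORLD", "123")

def Spec_gronsfeld_encrypt (plaintext : String) (key : String) (out : String) : Prop := out = gronsfeld_encrypt_alt plaintext key
instance (plaintext : String) (key : String) (out : String) : Decidable (Spec_gronsfeld_encrypt plaintext key out) := by unfold Spec_gronsfeld_encrypt; infer_instance

-- ===== CLAIM (what is proved, stated in full; the proofs are below) =====
def Claim_equal_gronsfeld_encrypt : Prop := ∀ (plaintext : String) (key : String), Dom_gronsfeld_encrypt plaintext key → Pre_gronsfeld_encrypt plaintext key → Spec_gronsfeld_encrypt plaintext key (gronsfeld_encrypt plaintext key)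

-- ===== LEMMAS AND PROOFS =====

-- Loop/reassembly correspondence: A's fold from key index k, for any per-(char,index) encoder f,
-- produces exactly B's reassembly of the encrypted filtered sequence enumerated from k.
theorem pvLoop_eq (f : Char → Int → Char) :
    ∀ (l : List Char) (k : Int) (acc : List Char),
      (l.foldl (fun (st : List Char × Int) char =>
          if char = ' ' then (st.1 ++ [' '], st.2)
          else (st.1 ++ [f char st.2], st.2 + 1)) (acc, k)).1
        = acc ++ pvReasm l ((PySem.List.enumerate (l.filter (fun c => c ≠ ' ')) k).map
            (fun ic => f ic.2 ic.1)) := by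
  intro l
  induction l with
  | nil => intro k acc; simp [pvReasm]
  | cons c rest ih =>
    intro k acc
    by_cases hc : c = ' '
    · subst hc
      simp only [List.foldl_cons, List.filter_cons]
      rw [ih]
      simp [pvReasm]
    · simp only [List.foldl_cons, List.filter_cons, hc, decide_true, ne_eq, not_false_iff, if_true, PySem.List.enumerate_cons, List.map_cons]
      rw [ih]
      simp [pvReasm, hc]

theorem pvPorts_eq (plaintext key : String) :
    gronsfeld_encrypt plaintext key = gronsfeld_encrypt_alt plaintext key := by
  unfold gronsfeld_encrypt gronsfeld_encrypt_alt
  exact congrArg String.ofList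
    (pvLoop_eq (fun c i => pvEncChar c (pvKeyShift key.toList i)) plaintext.toList 0 [])

-- ===== VERDICT (by name: the statement is the Claim_ definition above) =====
theorem gronsfeld_encrypt_spec : Claim_equal_gronsfeld_encrypt := by
  intro plaintext key _ _
  exact pvPorts_eq plaintext key
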